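-- pv_equiv track=rewrite | github.com/ChanLumerico/lucid | lucid/nn/functional/sampling.py | _flat_to_per_dim_pairs
-- ===== SOURCE A (Python) =====
-- def _flat_to_per_dim_pairs(
--     padding: tuple[int, ...], ndim: int
-- ) -> list[tuple[int, int]]:
--     """Convert flat (last→first) padding tuple to per-dim (first→last) pairs."""
--     n_pad_dims: int = len(padding) // 2
--     pad_pairs: list[tuple[int, int]] = [(0, 0)] * ndim
--     for i in range(n_pad_dims):
--         dim_idx: int = ndim - 1 - i
--         pad_pairs[dim_idx] = (padding[2 * i], padding[2 * i + 1])
--     return pad_pairs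
-- ===== SOURCE B (Python) =====
-- def _flat_to_per_dim_pairs(padding, ndim):
--     # Structural recursion: peel two entries off the front of the flat tuple,
--     # solve the rest for one fewer dim, and append this pair last.
--     if len(padding) < 2:
--         return [(0, 0)] * ndim
--     return _flat_to_per_dim_pairs(padding[2:], ndim - 1) + [(padding[0], padding[1])]
-- ===== Notes on version B (the rewrite author's own statement) =====
-- stated objective: alternative
-- what changed: B is a structural recursion on the flat tuple: it peels two entries off the front, recurses on the remainder with ndim-1, and appends that pair at the end, so there is no preallocated list, no range loop and no computed index at all.
-- outside the precondition, e.g. on _flat_to_per_dim_pairs((1, 2, 3, 4), 1): A returns [(3, 4)], B returns [(3, 4), (1, 2)]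
import Mathlib
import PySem

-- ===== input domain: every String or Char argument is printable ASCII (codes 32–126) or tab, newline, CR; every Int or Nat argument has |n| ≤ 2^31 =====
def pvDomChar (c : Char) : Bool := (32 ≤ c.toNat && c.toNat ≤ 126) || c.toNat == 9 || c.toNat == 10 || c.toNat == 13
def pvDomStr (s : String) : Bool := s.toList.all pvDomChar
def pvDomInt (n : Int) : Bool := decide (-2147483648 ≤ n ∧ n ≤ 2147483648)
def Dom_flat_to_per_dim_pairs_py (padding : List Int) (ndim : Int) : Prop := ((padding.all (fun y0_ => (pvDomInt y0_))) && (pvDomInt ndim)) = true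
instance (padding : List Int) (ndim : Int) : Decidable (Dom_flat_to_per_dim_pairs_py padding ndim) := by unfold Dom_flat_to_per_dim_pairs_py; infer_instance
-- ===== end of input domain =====

-- B replaces A's index loop that scatter-writes into a preallocated list by a structural
-- recursion on the flat tuple (peel two entries, recurse with ndim-1, append the pair last).

-- ===== PORT A =====
def flat_to_per_dim_pairs_py (padding : List Int) (ndim : Int) : List (Int × Int) :=
  let n_pad_dims : Int := PySem.Int.floordiv (padding.length : Int) 2
  let pad_pairs : List (Int × Int) := List.replicate ndim.toNat (0, 0)
  (PySem.List.pyRange 0 n_pad_dims 1).foldl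
    (fun acc i =>
      PySem.List.pySetD acc (ndim - 1 - i)
        (PySem.List.pyGetD padding (2 * i) 0, PySem.List.pyGetD padding (2 * i + 1) 0))
    pad_pairs

-- ===== PORT B =====
def flat_to_per_dim_pairs_py_alt : List Int → Int → List (Int × Int)
  | p0 :: p1 :: rest, ndim => flat_to_per_dim_pairs_py_alt rest (ndim - 1) ++ [(p0, p1)]
  | _, ndim => List.replicate ndim.toNat (0, 0)

-- ===== PRECONDITION & SPEC =====
-- Pre_ excludes ndim < 0 or len(padding)//2 > ndim: beyond 2*ndim pad dims A raises IndexError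
-- (or, for negative ndim, on the first write), and in between A's negative-index writes wrap
-- around and silently overwrite earlier entries — an accidental value no caller would specify,
-- while B returns a list longer than ndim there; both are equally unspecified for this corner.
def Pre_flat_to_per_dim_pairs_py (padding : List Int) (ndim : Int) : Prop :=
  0 ≤ ndim ∧ PySem.Int.floordiv (padding.length : Int) 2 ≤ ndim
instance (padding : List Int) (ndim : Int) : Decidable (Pre_flat_to_per_dim_pairs_py padding ndim) := by
  unfold Pre_flat_to_per_dim_pairs_py; infer_instance

def pvWitness_flat_to_per_dim_pairs_py : List Int × Int := ([1, 2, 3, 4], 3)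

def Spec_flat_to_per_dim_pairs_py (padding : List Int) (ndim : Int) (out : List (Int × Int)) : Prop := out = flat_to_per_dim_pairs_py_alt padding ndim
instance (padding : List Int) (ndim : Int) (out : List (Int × Int)) : Decidable (Spec_flat_to_per_dim_pairs_py padding ndim out) := by unfold Spec_flat_to_per_dim_pairs_py; infer_instance

-- ===== CLAIM (what is proved, stated in full; the proofs are below) =====
def Claim_equal_flat_to_per_dim_pairs_py : Prop := ∀ (padding : List Int) (ndim : Int), Dom_flat_to_per_dim_pairs_py padding ndim → Pre_flat_to_per_dim_pairs_py padding ndim → Spec_flat_to_per_dim_pairs_py padding ndim (flat_to_per_dim_pairs_py padding ndim)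

-- ===== LEMMAS AND PROOFS =====

-- A's loop after k of its n iterations: the last k slots of the zero list have been filled,
-- in reverse order, with the first k pairs.
lemma pv_loop_eq (padding : List Int) (d k : Nat) (hk : k ≤ d) :
    (PySem.List.pyRange 0 (k : Int) 1).foldl
      (fun acc i =>
        PySem.List.pySetD acc ((d : Int) - 1 - i)
          (PySem.List.pyGetD padding (2 * i) 0, PySem.List.pyGetD padding (2 * i + 1) 0))
      (List.replicate d ((0 : Int), (0 : Int)))
    = List.replicate (d - k) ((0 : Int), (0 : Int)) ++
      ((PySem.List.pyRange 0 (k : Int) 1).map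
        (fun i => (PySem.List.pyGetD padding (2 * i) 0, PySem.List.pyGetD padding (2 * i + 1) 0))).reverse := by
  induction k with
  | zero => simp [PySem.List.pyRange_one_eq_nil]
  | succ k ih =>
    have hk' : k ≤ d := Nat.le_of_succ_le hk
    have hsplit : PySem.List.pyRange 0 ((k : Int) + 1) 1
        = PySem.List.pyRange 0 (k : Int) 1 ++ [(k : Int)] := by
      exact PySem.List.pyRange_one_succ_right (by exact_mod_cast Nat.zero_le k)
    have hcast : ((k + 1 : Nat) : Int) = (k : Int) + 1 := by push_cast; ring
    rw [hcast, hsplit, List.foldl_append, ih hk', List.map_append, List.map_singleton,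
        List.reverse_append, List.reverse_singleton]
    -- the one remaining write hits the last zero slot
    simp only [List.foldl_cons, List.foldl_nil]
    have hnn : (0 : Int) ≤ (d : Int) - 1 - (k : Int) := by omega
    rw [PySem.List.pySetD_of_nonneg _ _ hnn]
    have htn : ((d : Int) - 1 - (k : Int)).toNat = d - 1 - k := by omega
    rw [htn]
    have hrep : List.replicate (d - k) ((0 : Int), (0 : Int))
        = List.replicate (d - 1 - k) ((0 : Int), (0 : Int)) ++ [((0 : Int), (0 : Int))] := by
      have : d - k = (d - 1 - k) + 1 := by omega
      rw [this, List.replicate_succ']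
    rw [hrep, List.append_assoc, List.set_append_right _ _ (by simp)]
    have : d - 1 - k - (List.replicate (d - 1 - k) ((0 : Int), (0 : Int))).length = 0 := by simp
    rw [this]
    simp [List.set_cons_zero]
    omega

-- indexing two past the front of a cons-cons list
lemma pv_pyGetD_cons2 (a b : Int) (xs : List Int) (i : Int) (h : 0 ≤ i) :
    PySem.List.pyGetD (a :: b :: xs) (i + 2) 0 = PySem.List.pyGetD xs i 0 := by
  have h2 : i + 2 = ((i.toNat + 2 : Nat) : Int) := by omega
  have hi : i = ((i.toNat : Nat) : Int) := by omega
  rw [h2, hi, PySem.List.pyGetD_natCast, PySem.List.pyGetD_natCast]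
  simp [List.getD, max_eq_left h]

-- map over pyRange 0 n 1 is a map over List.range n
lemma pv_map_pyRange_zero_nat {α : Type} (g : Int → α) (n : Nat) :
    (PySem.List.pyRange 0 (n : Int) 1).map g
    = (List.range n).map (fun k => g (Int.ofNat k)) := by
  rw [PySem.List.pyRange_one]
  simp only [Int.sub_zero, Int.toNat_natCast, List.map_map]
  refine List.map_congr_left (fun k _ => ?_)
  simp [Int.ofNat_eq_natCast]

-- B's recursion computes the same closed form: a zero prefix followed by the grouped pairs reversed.
lemma pv_alt_closed (padding : List Int) (d : Int) :
    flat_to_per_dim_pairs_py_alt padding d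
    = List.replicate (d - ((padding.length / 2 : Nat) : Int)).toNat ((0 : Int), (0 : Int)) ++
      ((PySem.List.pyRange 0 ((padding.length / 2 : Nat) : Int) 1).map
        (fun i => (PySem.List.pyGetD padding (2 * i) 0, PySem.List.pyGetD padding (2 * i + 1) 0))).reverse := by
  induction padding, d using flat_to_per_dim_pairs_py_alt.induct with
  | case2 padding d h =>
    -- padding has fewer than two entries, so len // 2 = 0
    rcases padding with _ | ⟨x, _ | ⟨y, rest⟩⟩
    · simp [flat_to_per_dim_pairs_py_alt, PySem.List.pyRange_one_eq_nil]
    · simp [flat_to_per_dim_pairs_py_alt, PySem.List.pyRange_one_eq_nil]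
    · exact (h x y rest rfl).elim
  | case1 p0 p1 rest d ih =>
    have hm : (p0 :: p1 :: rest).length / 2 = rest.length / 2 + 1 := by
      simp [List.length_cons]; omega
    rw [flat_to_per_dim_pairs_py_alt, ih, hm]
    set m := rest.length / 2 with hmdef
    have hrep : (d - 1 - (m : Int)).toNat = (d - ((m + 1 : Nat) : Int)).toNat := by omega
    rw [hrep, List.append_assoc]
    congr 1
    rw [pv_map_pyRange_zero_nat, pv_map_pyRange_zero_nat, List.range_succ_eq_map,
        List.map_cons, List.map_map, List.reverse_cons]
    have hget0 : PySem.List.pyGetD (p0 :: p1 :: rest) (2 * Int.ofNat 0) 0 = p0 := by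
      simp [Int.ofNat_eq_natCast]
    have hget1 : PySem.List.pyGetD (p0 :: p1 :: rest) (2 * Int.ofNat 0 + 1) 0 = p1 := by
      simp [Int.ofNat_eq_natCast, PySem.List.pyGetD, PySem.List.pyGet?, PySem.List.pyIdx?]
    have hshift : ((fun k : Nat =>
          (PySem.List.pyGetD (p0 :: p1 :: rest) (2 * Int.ofNat k) 0,
           PySem.List.pyGetD (p0 :: p1 :: rest) (2 * Int.ofNat k + 1) 0)) ∘ Nat.succ)
        = (fun k : Nat =>
            (PySem.List.pyGetD rest (2 * Int.ofNat k) 0,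
             PySem.List.pyGetD rest (2 * Int.ofNat k + 1) 0)) := by
      funext k
      have hk : (0 : Int) ≤ 2 * Int.ofNat k := by
        rw [Int.ofNat_eq_natCast]; positivity
      have hk1 : (0 : Int) ≤ 2 * Int.ofNat k + 1 := by omega
      have e1 : 2 * Int.ofNat (Nat.succ k) = 2 * Int.ofNat k + 2 := by
        simp only [Int.ofNat_eq_natCast]; push_cast; ring
      have e2 : 2 * Int.ofNat k + 2 + 1 = (2 * Int.ofNat k + 1) + 2 := by ring
      simp only [Function.comp_apply, e1, e2,
        pv_pyGetD_cons2 p0 p1 rest _ hk, pv_pyGetD_cons2 p0 p1 rest _ hk1]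
    rw [hshift, hget0, hget1]

-- ===== VERDICT (by name: the statement is the Claim_ definition above) =====
theorem flat_to_per_dim_pairs_py_spec : Claim_equal_flat_to_per_dim_pairs_py := by
  intro padding ndim _ hpre
  obtain ⟨hn0, hle⟩ := hpre
  unfold Spec_flat_to_per_dim_pairs_py flat_to_per_dim_pairs_py
  have hfd : PySem.Int.floordiv (padding.length : Int) 2 = ((padding.length / 2 : Nat) : Int) := by
    exact_mod_cast PySem.Int.floordiv_natCast padding.length 2
  set m : Nat := padding.length / 2 with hm
  have hle' : (m : Int) ≤ ndim := by rw [hfd] at hle; exact hle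
  have hd : ndim = ((ndim.toNat : Nat) : Int) := by omega
  have hmd : m ≤ ndim.toNat := by omega
  simp only [hfd]
  rw [pv_alt_closed, hd]
  simp only [Int.toNat_natCast]
  rw [pv_loop_eq padding ndim.toNat m hmd]
  have : (((ndim.toNat : Nat) : Int) - (m : Int)).toNat = ndim.toNat - m := by omega
  rw [this]
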